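-- pv_equiv track=rewrite | github.com/axels01/adventOfCode2023 | day_9/main.py | newLayer
-- ===== SOURCE A (Python) =====
-- def newLayer(layers):
--     if all(val == 0 for val in layers[-1]):
--         return layers
--
--     # Adds the next "layer"
--     layer = []
--     for i in range(len(layers[-1])):
--         # Will run as long as we're not looking at the 'last' pair
--         if (i + 1) >= len(layers[-1]):
--             break
--         else:
--             # Adds the derrivative to the new layer
--             layer.append(layers[-1][i + 1] - layers[-1][i])
--
--     # Returns layers with the new layer
--     layers.append(layer)
--     return newLayer(layers)
-- ===== SOURCE B (Python) =====
-- def newLayer(layers):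
--     # Iterative: keep appending the consecutive-differences row (in place)
--     # until the last row is empty or all zeros; returns the same list object.
--     while any(v != 0 for v in layers[-1]):
--         last = layers[-1]
--         layers.append([b - a for a, b in zip(last, last[1:])])
--     return layers
-- ===== Notes on version B (the rewrite author's own statement) =====
-- stated objective: idiomatic
-- what changed: Replaces the recursion with an iterative while-loop and builds each difference row with zip over adjacent pairs instead of an index loop with a break; still mutates and returns the same list object.
-- outside the precondition, e.g. on newLayer([]): A raises IndexError, B raises IndexError
import Mathlib
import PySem

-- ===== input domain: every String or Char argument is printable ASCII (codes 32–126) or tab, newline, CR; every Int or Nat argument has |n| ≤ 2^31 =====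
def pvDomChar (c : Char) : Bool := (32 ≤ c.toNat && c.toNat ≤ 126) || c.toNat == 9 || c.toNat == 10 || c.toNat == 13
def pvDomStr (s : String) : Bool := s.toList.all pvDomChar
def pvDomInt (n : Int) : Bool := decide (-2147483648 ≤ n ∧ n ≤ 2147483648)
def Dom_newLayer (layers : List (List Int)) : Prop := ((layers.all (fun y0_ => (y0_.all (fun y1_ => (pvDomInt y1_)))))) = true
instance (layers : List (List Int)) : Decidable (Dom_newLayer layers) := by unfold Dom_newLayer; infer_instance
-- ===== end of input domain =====

-- B replaces A's recursion by an iterative while-loop building each difference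
-- row from zip over adjacent pairs (idiomatic); mutation of the argument is a
-- Python side effect, the equivalence proved here is about the return value.

-- ===== PORT A =====
-- the index loop with break: appends last[i+1]-last[i] while i+1 < len(last)
def pvBuildLayer (last : List Int) (i : Nat) : List Int :=
  if i + 1 ≥ last.length then []
  else (last.getD (i+1) 0 - last.getD i 0) :: pvBuildLayer last (i+1)
termination_by last.length - i

-- length fact pvBuildLayer needs for newLayer's termination (cited in decreasing_by)
theorem pvBuildLayer_length (last : List Int) (i : Nat) :
    (pvBuildLayer last i).length = last.length - (i+1) := by
  rw [pvBuildLayer]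
  split
  · simp; omega
  · rename_i h
    simp only [List.length_cons, pvBuildLayer_length last (i+1)]
    omega
termination_by last.length - i

def newLayer (layers : List (List Int)) : List (List Int) :=
  let last := (PySem.List.pyGet? layers (-1)).getD []
  if last.all (fun val => val == 0) then layers
  else
    newLayer (layers ++ [pvBuildLayer last 0])
termination_by ((PySem.List.pyGet? layers (-1)).getD []).length
decreasing_by
  rename_i h
  simp only [PySem.List.pyGet?_neg_one_append_singleton, Option.getD_some,
    pvBuildLayer_length]
  have hne : last ≠ [] := by intro he; rw [he] at h; simp at h
  have hpos : 0 < last.length := List.length_pos_iff.mpr hne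
  show last.length - (0 + 1) < last.length
  omega

-- ===== PORT B =====
def newLayer_alt (layers : List (List Int)) : List (List Int) :=
  let last := (PySem.List.pyGet? layers (-1)).getD []
  if last.any (fun v => v != 0) then
    newLayer_alt (layers ++ [(last.zip (last.drop 1)).map (fun p => p.2 - p.1)])
  else layers
termination_by ((PySem.List.pyGet? layers (-1)).getD []).length
decreasing_by
  rename_i h
  simp only [PySem.List.pyGet?_neg_one_append_singleton, Option.getD_some,
    List.length_map, List.length_zip, List.length_drop]
  have hne : last ≠ [] := by intro he; rw [he] at h; simp at h
  have hpos : 0 < last.length := List.length_pos_iff.mpr hne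
  show min last.length (last.length - 1) < last.length
  omega

-- ===== PRECONDITION & SPEC =====
-- Pre_ excludes only layers = [], on which Python A raises IndexError (layers[-1]).
def Pre_newLayer (layers : List (List Int)) : Prop := layers ≠ []
instance (layers : List (List Int)) : Decidable (Pre_newLayer layers) := by unfold Pre_newLayer; infer_instance
def pvWitness_newLayer : List (List Int) := [[1, 4, 9]]

def Spec_newLayer (layers : List (List Int)) (out : List (List Int)) : Prop := out = newLayer_alt layers
instance (layers : List (List Int)) (out : List (List Int)) : Decidable (Spec_newLayer layers out) := by unfold Spec_newLayer; infer_instance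

-- ===== CLAIM (what is proved, stated in full; the proofs are below) =====
def Claim_equal_newLayer : Prop := ∀ (layers : List (List Int)), Dom_newLayer layers → Pre_newLayer layers → Spec_newLayer layers (newLayer layers)

-- ===== LEMMAS AND PROOFS =====

theorem pvBuildLayer_eq (last : List Int) (i : Nat) :
    pvBuildLayer last i =
      ((last.drop i).zip (last.drop (i+1))).map (fun p => p.2 - p.1) := by
  rw [pvBuildLayer]
  split
  · rename_i h
    have : last.drop (i+1) = [] := List.drop_eq_nil_of_le h
    simp [this]
  · rename_i h
    have hi : i < last.length := by omega
    have hi1 : i + 1 < last.length := by omega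
    rw [pvBuildLayer_eq last (i+1)]
    have hdi : List.drop i last = last[i] :: List.drop (i+1) last :=
      List.drop_eq_getElem_cons hi
    have hdi1 : List.drop (i+1) last = last[i+1] :: List.drop (i+2) last :=
      List.drop_eq_getElem_cons hi1
    rw [hdi, hdi1]
    simp only [List.zip_cons_cons, List.map_cons]
    rw [List.getD_eq_getElem?_getD, List.getD_eq_getElem?_getD,
      List.getElem?_eq_getElem hi, List.getElem?_eq_getElem hi1]
    rfl
termination_by last.length - i

theorem newLayer_eq_alt (layers : List (List Int)) :
    newLayer layers = newLayer_alt layers := by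
  fun_induction newLayer layers with
  | case1 layers last h =>
    rw [newLayer_alt]
    have hnot : (last.any fun v => v != 0) = false := by
      rw [List.any_eq_false]
      intro v hv
      have := List.all_eq_true.mp h v hv
      simpa using this
    have hb : last = (PySem.List.pyGet? layers (-1)).getD [] := rfl
    rw [← hb]
    simp [hnot]
  | case2 layers last h ih =>
    rw [newLayer_alt]
    have hany : last.any (fun v => v != 0) = true := by
      simp only [List.all_eq_true, beq_iff_eq, not_forall] at h
      simp only [List.any_eq_true, bne_iff_ne, ne_eq]
      obtain ⟨v, hv, hne⟩ := h
      exact ⟨v, hv, hne⟩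
    have hb : last = (PySem.List.pyGet? layers (-1)).getD [] := rfl
    rw [← hb, if_pos hany]
    have hlayer : pvBuildLayer last 0 =
        (last.zip (last.drop 1)).map (fun p => p.2 - p.1) := by
      simpa using pvBuildLayer_eq last 0
    rw [← hlayer]
    exact ih

theorem newLayer_spec : Claim_equal_newLayer := by
  intro layers _ _
  unfold Spec_newLayer
  exact newLayer_eq_alt layers
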